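-- pv_equiv track=rewrite | github.com/mindspore-lab/models | research/SYSU/Klotski/utils.py | sample_from_range
-- ===== SOURCE A (Python) =====
-- def sample_from_range(n, k):
--     assert n >= 1
--
--     if k == -1:
--         ret = [1]
--         while ret[-1] * 2 < n:
--             ret.append(ret[-1] * 2)
--         return ret
--     else:
--         if k == 1: return [1]
--         step = (n - 1) // (k - 1)
--         return list(range(1, n + 1, step))
-- ===== SOURCE B (Python) =====
-- def _powers_below(n):
--     # all powers of two in [1, n) plus the seed 1, by halving recursion on n
--     if n <= 2:
--         return [1]
--     return [1] + [2 * x for x in _powers_below((n + 1) // 2)]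
--
--
-- def sample_from_range(n, k):
--     assert n >= 1
--
--     if k == -1:
--         return _powers_below(n)
--     if k == 1:
--         return [1]
--     step = (n - 1) // (k - 1)
--     if step <= 0:
--         return []
--     out = []
--     v = 1 + ((n - 1) // step) * step   # largest progression element <= n
--     while v >= 1:
--         out.append(v)
--         v -= step
--     return out[::-1]
-- ===== Notes on version B (the rewrite author's own statement) =====
-- stated objective: alternative
-- what changed: The geometric branch replaces A's iterative doubling of the running last element by a halving recursion on the bound n (powers below n = 1 :: doubled powers below ceil(n/2)), and the linear branch replaces list(range(...)) by computing the largest progression element and building the list back-to-front by subtracting the step, then reversing.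
import Mathlib
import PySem

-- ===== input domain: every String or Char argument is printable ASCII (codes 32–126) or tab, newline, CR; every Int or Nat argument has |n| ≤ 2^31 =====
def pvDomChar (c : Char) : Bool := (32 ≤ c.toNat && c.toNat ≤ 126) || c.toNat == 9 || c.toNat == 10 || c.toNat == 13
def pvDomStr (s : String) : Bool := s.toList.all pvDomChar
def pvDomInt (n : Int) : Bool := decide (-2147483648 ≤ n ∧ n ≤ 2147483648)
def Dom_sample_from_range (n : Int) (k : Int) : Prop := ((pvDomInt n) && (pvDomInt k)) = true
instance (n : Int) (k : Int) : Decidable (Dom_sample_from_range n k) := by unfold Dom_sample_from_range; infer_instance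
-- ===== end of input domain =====

-- B rebuilds the geometric branch by a halving recursion on n and the linear branch back-to-front from its largest element; objective: alternative decomposition, same cost.

-- ===== PORT A =====
-- A's while-loop: `ret = [1]; while ret[-1]*2 < n: ret.append(ret[-1]*2)`.
-- `last` carries ret[-1]; the `0 < last` conjunct is a totality guard only (last starts at 1 and doubles, so it always holds).
def geomLoopA (n : Int) (last : Int) (acc : List Int) : List Int :=
  if _h : 0 < last ∧ last * 2 < n then geomLoopA n (last * 2) (acc ++ [last * 2]) else acc
termination_by (n - last).toNat
decreasing_by omega

def sample_from_range (n : Int) (k : Int) : List Int :=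
  if k = -1 then geomLoopA n 1 [1]
  else if k = 1 then [1]
  else PySem.List.pyRange 1 (n + 1) (PySem.Int.floordiv (n - 1) (k - 1))

-- ===== PORT B =====
-- Source B's _powers_below: halving recursion on the bound n
def powersBelow (n : Int) : List Int :=
  if n ≤ 2 then [1]
  else 1 :: (powersBelow (PySem.Int.floordiv (n + 1) 2)).map (fun x => 2 * x)
termination_by n.toNat
decreasing_by
  rw [PySem.Int.floordiv_eq_ediv_of_pos (by omega : (0:Int) < 2)]; omega

-- Source B's back-to-front while-loop `while v >= 1: out.append(v); v -= step`;
-- the `0 < step` conjunct is a totality guard only (the caller checks step > 0 first).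
def linLoopB (step : Int) (v : Int) (acc : List Int) : List Int :=
  if _h : 1 ≤ v ∧ 0 < step then linLoopB step (v - step) (acc ++ [v]) else acc
termination_by v.toNat
decreasing_by omega

def sample_from_range_alt (n : Int) (k : Int) : List Int :=
  if k = -1 then powersBelow n
  else if k = 1 then [1]
  else
    let step := PySem.Int.floordiv (n - 1) (k - 1)
    if step ≤ 0 then []
    else (linLoopB step (1 + PySem.Int.floordiv (n - 1) step * step) []).reverse

-- ===== PRECONDITION & SPEC =====
-- Pre_ excludes exactly the inputs where A raises: n < 1 (AssertionError) and the
-- k ∉ {-1, 1} inputs with (n-1)//(k-1) == 0, where range() raises ValueError (step 0).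
def Pre_sample_from_range (n : Int) (k : Int) : Prop :=
  1 ≤ n ∧ (k = -1 ∨ k = 1 ∨ PySem.Int.floordiv (n - 1) (k - 1) ≠ 0)
instance (n : Int) (k : Int) : Decidable (Pre_sample_from_range n k) := by
  unfold Pre_sample_from_range; infer_instance

def pvWitness_sample_from_range : Int × Int := (10, -1)

def Spec_sample_from_range (n : Int) (k : Int) (out : List Int) : Prop := out = sample_from_range_alt n k
instance (n : Int) (k : Int) (out : List Int) : Decidable (Spec_sample_from_range n k out) := by unfold Spec_sample_from_range; infer_instance

-- ===== CLAIM (what is proved, stated in full; the proofs are below) =====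
def Claim_equal_sample_from_range : Prop := ∀ (n : Int) (k : Int), Dom_sample_from_range n k → Pre_sample_from_range n k → Spec_sample_from_range n k (sample_from_range n k)

-- ===== LEMMAS AND PROOFS =====

-- characterisation of A's doubling loop: starting at 2^j it appends 2^(j+1) … 2^(c-1),
-- where c = max 1 (n-1).toNat.size
theorem geomLoopA_eq (n : Int) (hn : 1 ≤ n) :
    ∀ (d j : Nat) (acc : List Int),
      max 1 (n - 1).toNat.size = j + 1 + d →
      geomLoopA n ((2 : Int) ^ j) acc
        = acc ++ (List.range' (j + 1) d).map (fun i => (2 : Int) ^ i) := by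
  intro d
  induction d with
  | zero =>
    intro j acc hc
    rw [geomLoopA]
    have hpow : (0 : Int) < 2 ^ j := by positivity
    have hstop : ¬ ((2 : Int) ^ j * 2 < n) := by
      intro hlt
      have h1 : (2 : Int) ^ (j + 1) ≤ n - 1 := by rw [pow_succ]; omega
      have h2 : (2 : ℕ) ^ (j + 1) ≤ (n - 1).toNat := by
        have : ((2 : ℕ) ^ (j + 1) : Int) = (2 : Int) ^ (j + 1) := by push_cast; ring
        omega
      have h3 : j + 1 < (n - 1).toNat.size := Nat.lt_size.mpr h2
      omega
    simp [hstop, List.range', hpow]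
  | succ d ih =>
    intro j acc hc
    have hsize : j + 1 < (n - 1).toNat.size := by omega
    have h2 : (2 : ℕ) ^ (j + 1) ≤ (n - 1).toNat := Nat.lt_size.mp hsize
    have hlt : (2 : Int) ^ j * 2 < n := by
      have : ((2 : ℕ) ^ (j + 1) : Int) = (2 : Int) ^ j * 2 := by push_cast [pow_succ]; ring
      omega
    have hpow : (0 : Int) < 2 ^ j := by positivity
    rw [geomLoopA]
    rw [dif_pos ⟨hpow, hlt⟩]
    have hstep : (2 : Int) ^ j * 2 = 2 ^ (j + 1) := by rw [pow_succ]
    rw [hstep]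
    rw [ih (j + 1) (acc ++ [(2 : Int) ^ (j + 1)]) (by omega)]
    rw [List.range'_succ]
    simp

theorem geomA_range (n : Int) (hn : 1 ≤ n) :
    geomLoopA n 1 [1]
      = (List.range (max 1 (n - 1).toNat.size)).map (fun i => (2 : Int) ^ i) := by
  set c : Nat := max 1 (n - 1).toNat.size with hc
  have hc1 : 1 ≤ c := le_max_left _ _
  have hA : geomLoopA n 1 [1]
      = [1] ++ (List.range' 1 (c - 1)).map (fun i => (2 : Int) ^ i) := by
    have := geomLoopA_eq n hn (c - 1) 0 [1] (by omega)
    simpa using this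
  rw [hA, List.range_eq_range']
  have hsplit : List.range' 0 c = 0 :: List.range' 1 (c - 1) := by
    obtain ⟨d, hd⟩ : ∃ d, c = d + 1 := ⟨c - 1, by omega⟩
    rw [hd]; simp [List.range'_succ]
  rw [hsplit]; simp

theorem size_div2 (x : Nat) (hx : 1 ≤ x) : x.size = (x / 2).size + 1 := by
  apply le_antisymm
  · apply Nat.size_le.mpr
    have h1 : x / 2 < 2 ^ (x / 2).size := Nat.lt_size_self _
    have : 2 ^ ((x / 2).size + 1) = 2 * 2 ^ (x / 2).size := by ring
    omega
  · have : (x / 2).size < x.size := by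
      apply Nat.lt_size.mpr
      cases h : (x / 2).size with
      | zero => simpa using hx
      | succ s =>
        have hs : 2 ^ s ≤ x / 2 := Nat.lt_size.mp (by omega)
        have : 2 ^ (s + 1) = 2 * 2 ^ s := by ring
        omega
    omega

theorem powersBelow_eq : ∀ (m : Nat) (n : Int), n.toNat = m → 1 ≤ n →
    powersBelow n = (List.range (max 1 (n - 1).toNat.size)).map (fun i => (2 : Int) ^ i) := by
  intro m
  induction m using Nat.strong_induction_on with
  | _ m ih =>
    intro n hm hn
    rw [powersBelow]
    by_cases hsmall : n ≤ 2
    · have hsz : (n - 1).toNat.size ≤ 1 := Nat.size_le.mpr (by omega)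
      have : max 1 (n - 1).toNat.size = 1 := by omega
      rw [if_pos hsmall, this]
      simp
    · rw [if_neg hsmall]
      have h2 : PySem.Int.floordiv (n + 1) 2 = (n + 1) / 2 :=
        PySem.Int.floordiv_eq_ediv_of_pos (by omega)
      rw [h2]
      have hnh1 : (1 : Int) ≤ (n + 1) / 2 := by omega
      have hlt : ((n + 1) / 2).toNat < m := by omega
      rw [ih ((n + 1) / 2).toNat hlt _ rfl hnh1]
      have hhalf : ((n + 1) / 2 - 1).toNat = (n - 1).toNat / 2 := by omega
      have hge1 : 1 ≤ (n - 1).toNat / 2 := by omega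
      have hsz : (n - 1).toNat.size = ((n - 1).toNat / 2).size + 1 := size_div2 _ (by omega)
      have hsz1 : 1 ≤ ((n - 1).toNat / 2).size := Nat.lt_size.mpr (by simpa using hge1)
      have hmax : max 1 (n - 1).toNat.size = max 1 (((n + 1) / 2 - 1).toNat.size) + 1 := by
        rw [hhalf]; omega
      rw [hmax, List.range_succ_eq_map]
      simp only [List.map_cons, List.map_map, pow_zero]
      refine congrArg (List.cons 1) (List.map_congr_left ?_)
      intro i _
      simp [pow_succ]
      ring

-- Source B's descending loop accumulates v, v-step, …, 1 — the reversed ascending progression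
theorem linLoopB_eq (step : Int) (hstep : 1 ≤ step) :
    ∀ (j : Nat) (acc : List Int),
      linLoopB step (1 + step * j) acc
        = acc ++ ((List.range (j + 1)).map (fun i : Nat => 1 + step * (i : Int))).reverse := by
  intro j
  induction j with
  | zero =>
    intro acc
    rw [linLoopB]
    rw [dif_pos (by push_cast; exact ⟨by omega, by omega⟩)]
    rw [linLoopB]
    rw [dif_neg (by push_cast; omega)]
    simp
  | succ j ih =>
    intro acc
    have hc : ((j + 1 : Nat) : Int) = (j : Int) + 1 := by push_cast; ring
    rw [linLoopB, hc]
    rw [dif_pos ⟨by nlinarith [Int.natCast_nonneg j], by omega⟩]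
    rw [show 1 + step * ((j : Int) + 1) - step = 1 + step * (j : Int) from by ring]
    rw [ih]
    conv_rhs => rw [List.range_succ]
    simp [hc]

-- the ascending progression 1, 1+step, …, ≤ n, as Python's range(1, n+1, step) produces it
theorem pyRange_lin (n step : Int) (hn : 1 ≤ n) (hstep : 1 ≤ step) :
    PySem.List.pyRange 1 (n + 1) step
      = (List.range (((n - 1) / step).toNat + 1)).map (fun i : Nat => 1 + step * (i : Int)) := by
  rw [PySem.List.pyRange_of_pos _ _ (by omega)]
  have hlt : (1 : Int) < n + 1 := by omega
  rw [if_pos hlt]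
  have hcount : (n + 1 - 1 + step - 1) / step = (n - 1) / step + 1 := by
    have := Int.add_mul_ediv_right (n - 1) 1 (show step ≠ 0 by omega)
    rw [show n + 1 - 1 + step - 1 = n - 1 + 1 * step from by ring, this]
  rw [hcount]
  have hq : 0 ≤ (n - 1) / step := Int.ediv_nonneg (by omega) (by omega)
  have ht : ((n - 1) / step + 1).toNat = ((n - 1) / step).toNat + 1 := by omega
  rw [ht]

-- ===== VERDICT (by name: the statement is the Claim_ definition above) =====
theorem sample_from_range_spec : Claim_equal_sample_from_range := by
  intro n k _ hpre
  obtain ⟨hn, hk⟩ := hpre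
  unfold Spec_sample_from_range sample_from_range sample_from_range_alt
  by_cases h1 : k = -1
  · rw [if_pos h1, if_pos h1]
    rw [geomA_range n hn, powersBelow_eq n.toNat n rfl hn]
  · rw [if_neg h1, if_neg h1]
    by_cases h2 : k = 1
    · rw [if_pos h2, if_pos h2]
    · rw [if_neg h2, if_neg h2]
      have hkstep : PySem.Int.floordiv (n - 1) (k - 1) ≠ 0 := by tauto
      set step : Int := PySem.Int.floordiv (n - 1) (k - 1) with hs
      by_cases hpos : step ≤ 0
      · -- step < 0: Python range(1, n+1, step) is empty, and B returns []
        have hneg : step < 0 := lt_of_le_of_ne hpos hkstep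
        simp only [if_pos hpos]
        unfold PySem.List.pyRange
        rw [if_neg (show step ≠ 0 from hkstep)]
        rw [if_neg (by omega : ¬ (0 : Int) < step)]
        rw [if_neg (by omega : ¬ (n + 1) < 1)]
        simp
      · have hpos : 0 < step := by omega
        simp only [if_neg (by omega : ¬ step ≤ 0)]
        have hq : PySem.Int.floordiv (n - 1) step = (n - 1) / step :=
          PySem.Int.floordiv_eq_ediv_of_pos hpos
        have hq0 : 0 ≤ (n - 1) / step := Int.ediv_nonneg (by omega) (by omega)
        have hB := linLoopB_eq step (by omega) ((n - 1) / step).toNat []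
        rw [pyRange_lin n step hn (by omega), hq]
        rw [show PySem.Int.floordiv (n-1) (k-1) = step from rfl] at *
        rw [show (1 : Int) + (n - 1) / step * step
              = 1 + step * (((n - 1) / step).toNat : Int) from by
          rw [Int.toNat_of_nonneg hq0]; ring]
        rw [hB]
        simp
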